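-- pv_equiv track=rewrite | github.com/alexpavlock1/Meraki_Life_Cycle_Report_For_Gov | adoption.py | determine_product_availability
-- ===== SOURCE A (Python) =====
-- def determine_product_availability(inventory_devices, manual_config=None):
--     """
--     Determine which Meraki products are available in the organization.
--     """
--     products = {
--         'MX': False,
--         'MS': False,
--         'MR': False,
--         'MG': False,
--         'MV': False,
--         'MT': False,
--         'Secure Connect': False,
--         'Umbrella Secure Internet Gateway': False,
--         'Thousand Eyes': False,
--         'Spaces': False,
--         'XDR': False
--     }
--
--     # Determine product availability from inventory devices
--     if inventory_devices:
--         products['MX'] = any(device.get('model', '').upper().startswith('MX') for device in inventory_devices)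
--         products['MS'] = any(device.get('model', '').upper().startswith('MS') for device in inventory_devices)
--         products['MR'] = any(device.get('model', '').upper().startswith('MR') or device.get('model', '').upper().startswith('CW') for device in inventory_devices)
--         products['MG'] = any(device.get('model', '').upper().startswith('MG') for device in inventory_devices)
--         products['MV'] = any(device.get('model', '').upper().startswith('MV') for device in inventory_devices)
--         products['MT'] = any(device.get('model', '').upper().startswith('MT') for device in inventory_devices)
--
--     # Override with manual configurations if provided
--     if manual_config:
--         for product, value in manual_config.items():
--             if product in products:
--                 products[product] = value
--
--     return products
-- ===== SOURCE B (Python) =====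
-- def determine_product_availability(inventory_devices, manual_config=None):
--     # One pass over the inventory, computing each device's model once.
--     mx = ms = mr = mg = mv = mt = False
--     for device in (inventory_devices or []):
--         m = device.get('model', '').upper()
--         mx = mx or m.startswith('MX')
--         ms = ms or m.startswith('MS')
--         mr = mr or m.startswith('MR') or m.startswith('CW')
--         mg = mg or m.startswith('MG')
--         mv = mv or m.startswith('MV')
--         mt = mt or m.startswith('MT')
--     products = {
--         'MX': mx, 'MS': ms, 'MR': mr, 'MG': mg, 'MV': mv, 'MT': mt,
--         'Secure Connect': False,
--         'Umbrella Secure Internet Gateway': False,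
--         'Thousand Eyes': False,
--         'Spaces': False,
--         'XDR': False,
--     }
--     if manual_config:
--         for product, value in manual_config.items():
--             if product in products:
--                 products[product] = value
--     return products
-- ===== Notes on version B (the rewrite author's own statement) =====
-- stated objective: simpler
-- what changed: Replaces six separate any() scans of the inventory (each re-reading and re-uppercasing every model, twice for the MR/CW test) with a single loop that computes each device's upper-cased model once and ORs all six flags, building the products dict afterwards; the manual_config override loop is kept verbatim.
import Mathlib
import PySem

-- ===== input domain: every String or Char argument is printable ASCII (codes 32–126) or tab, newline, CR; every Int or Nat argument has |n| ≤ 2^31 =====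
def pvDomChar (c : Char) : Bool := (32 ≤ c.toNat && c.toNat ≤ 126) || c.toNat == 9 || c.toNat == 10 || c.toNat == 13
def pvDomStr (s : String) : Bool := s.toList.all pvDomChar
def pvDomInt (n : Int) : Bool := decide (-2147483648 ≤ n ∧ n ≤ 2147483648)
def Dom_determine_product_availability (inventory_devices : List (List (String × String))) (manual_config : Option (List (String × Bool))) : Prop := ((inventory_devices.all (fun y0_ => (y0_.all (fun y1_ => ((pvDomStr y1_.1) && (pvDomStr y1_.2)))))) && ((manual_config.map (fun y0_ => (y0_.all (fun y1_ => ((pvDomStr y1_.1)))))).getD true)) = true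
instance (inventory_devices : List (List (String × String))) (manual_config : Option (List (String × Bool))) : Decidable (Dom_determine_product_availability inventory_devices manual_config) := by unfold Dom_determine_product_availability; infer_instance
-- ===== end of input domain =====

-- B makes one pass over the inventory (computing each upper-cased model once) instead of A's six any() scans; the override loop is unchanged.

-- ===== PORT A =====
def determine_product_availability (inventory_devices : List (List (String × String))) (manual_config : Option (List (String × Bool))) : List (String × Bool) :=
  let products : PySem.Dict String Bool := PySem.Dict.mk
    [("MX", false), ("MS", false), ("MR", false), ("MG", false), ("MV", false), ("MT", false),
     ("Secure Connect", false), ("Umbrella Secure Internet Gateway", false),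
     ("Thousand Eyes", false), ("Spaces", false), ("XDR", false)]
  let products :=
    if inventory_devices.isEmpty then products else
      let products := products.insert "MX" (inventory_devices.any (fun device => PySem.Str.startswith (PySem.Str.upper ((PySem.Dict.mk device).getD "model" "")) "MX"))
      let products := products.insert "MS" (inventory_devices.any (fun device => PySem.Str.startswith (PySem.Str.upper ((PySem.Dict.mk device).getD "model" "")) "MS"))
      let products := products.insert "MR" (inventory_devices.any (fun device => PySem.Str.startswith (PySem.Str.upper ((PySem.Dict.mk device).getD "model" "")) "MR" || PySem.Str.startswith (PySem.Str.upper ((PySem.Dict.mk device).getD "model" "")) "CW"))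
      let products := products.insert "MG" (inventory_devices.any (fun device => PySem.Str.startswith (PySem.Str.upper ((PySem.Dict.mk device).getD "model" "")) "MG"))
      let products := products.insert "MV" (inventory_devices.any (fun device => PySem.Str.startswith (PySem.Str.upper ((PySem.Dict.mk device).getD "model" "")) "MV"))
      let products := products.insert "MT" (inventory_devices.any (fun device => PySem.Str.startswith (PySem.Str.upper ((PySem.Dict.mk device).getD "model" "")) "MT"))
      products
  let products :=
    match manual_config with
    | none => products
    | some cfg =>
      if cfg.isEmpty then products else
        cfg.foldl (fun pr (kv : String × Bool) => if pr.contains kv.1 then pr.insert kv.1 kv.2 else pr) products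
  products.items

-- ===== PORT B =====
def determine_product_availability_alt (inventory_devices : List (List (String × String))) (manual_config : Option (List (String × Bool))) : List (String × Bool) :=
  let fl : Bool × Bool × Bool × Bool × Bool × Bool :=
    inventory_devices.foldl (fun s device =>
      let m := PySem.Str.upper ((PySem.Dict.mk device).getD "model" "")
      (s.1 || PySem.Str.startswith m "MX",
       s.2.1 || PySem.Str.startswith m "MS",
       s.2.2.1 || PySem.Str.startswith m "MR" || PySem.Str.startswith m "CW",
       s.2.2.2.1 || PySem.Str.startswith m "MG",
       s.2.2.2.2.1 || PySem.Str.startswith m "MV",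
       s.2.2.2.2.2 || PySem.Str.startswith m "MT"))
      (false, false, false, false, false, false)
  let products : PySem.Dict String Bool := PySem.Dict.mk
    [("MX", fl.1), ("MS", fl.2.1), ("MR", fl.2.2.1), ("MG", fl.2.2.2.1), ("MV", fl.2.2.2.2.1), ("MT", fl.2.2.2.2.2),
     ("Secure Connect", false), ("Umbrella Secure Internet Gateway", false),
     ("Thousand Eyes", false), ("Spaces", false), ("XDR", false)]
  let products :=
    match manual_config with
    | none => products
    | some cfg =>
      if cfg.isEmpty then products else
        cfg.foldl (fun pr (kv : String × Bool) => if pr.contains kv.1 then pr.insert kv.1 kv.2 else pr) products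
  products.items

-- ===== PRECONDITION & SPEC =====
def Spec_determine_product_availability (inventory_devices : List (List (String × String))) (manual_config : Option (List (String × Bool))) (out : List (String × Bool)) : Prop := out = determine_product_availability_alt inventory_devices manual_config
instance (inventory_devices : List (List (String × String))) (manual_config : Option (List (String × Bool))) (out : List (String × Bool)) : Decidable (Spec_determine_product_availability inventory_devices manual_config out) := by unfold Spec_determine_product_availability; infer_instance

-- ===== CLAIM (what is proved, stated in full; the proofs are below) =====
def Claim_equal_determine_product_availability : Prop := ∀ (inventory_devices : List (List (String × String))) (manual_config : Option (List (String × Bool))), Dom_determine_product_availability inventory_devices manual_config → Spec_determine_product_availability inventory_devices manual_config (determine_product_availability inventory_devices manual_config)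

-- ===== LEMMAS AND PROOFS =====

-- the per-device model string
def pvMdl (device : List (String × String)) : String :=
  PySem.Str.upper ((PySem.Dict.mk device).getD "model" "")

-- B's single-pass fold computes the six any-scans of A
theorem pvFold_eq (inv : List (List (String × String))) (s : Bool × Bool × Bool × Bool × Bool × Bool) :
    inv.foldl (fun s device =>
      let m := PySem.Str.upper ((PySem.Dict.mk device).getD "model" "")
      (s.1 || PySem.Str.startswith m "MX",
       s.2.1 || PySem.Str.startswith m "MS",
       s.2.2.1 || PySem.Str.startswith m "MR" || PySem.Str.startswith m "CW",
       s.2.2.2.1 || PySem.Str.startswith m "MG",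
       s.2.2.2.2.1 || PySem.Str.startswith m "MV",
       s.2.2.2.2.2 || PySem.Str.startswith m "MT")) s
    = (s.1 || inv.any (fun d => PySem.Str.startswith (pvMdl d) "MX"),
       s.2.1 || inv.any (fun d => PySem.Str.startswith (pvMdl d) "MS"),
       s.2.2.1 || inv.any (fun d => PySem.Str.startswith (pvMdl d) "MR" || PySem.Str.startswith (pvMdl d) "CW"),
       s.2.2.2.1 || inv.any (fun d => PySem.Str.startswith (pvMdl d) "MG"),
       s.2.2.2.2.1 || inv.any (fun d => PySem.Str.startswith (pvMdl d) "MV"),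
       s.2.2.2.2.2 || inv.any (fun d => PySem.Str.startswith (pvMdl d) "MT")) := by
  induction inv generalizing s with
  | nil =>
    obtain ⟨a, b, c, d, e, f⟩ := s
    simp only [List.foldl_nil, List.any_nil, Bool.or_false]
  | cons x xs ih =>
    simp only [List.foldl_cons, List.any_cons, ih, pvMdl]
    simp [Bool.or_assoc]

-- ===== VERDICT (by name: the statement is the Claim_ definition above) =====
set_option maxHeartbeats 2000000 in
theorem determine_product_availability_spec : Claim_equal_determine_product_availability := by
  intro inv mc _
  unfold Spec_determine_product_availability determine_product_availability determine_product_availability_alt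
  rw [pvFold_eq]
  cases inv with
  | nil => rfl
  | cons x xs =>
    rfl
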